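-- pv_equiv track=rewrite | github.com/Naman027/Scientific-Computing-Lab-MA322 | lab02/180123029_Naman_q5.py | NewtonMat
-- ===== SOURCE A (Python) =====
-- def NewtonPoly(xr,j,x):
--     ans = 1
--     for i in range(j):
--         ans*=(x-xr[i])
--     return ans
--
-- def NewtonMat(xr):
--     n = len(xr)
--     mat = []
--     for i in range(n):
--         hor = []
--         for j in range(n):
--             val = NewtonPoly(xr,j,xr[i])
--             hor.append(val)
--         mat.append(hor)
--     return mat
-- ===== SOURCE B (Python) =====
-- def NewtonMat(xr):
--     mat = []
--     for x in xr:
--         hor = []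
--         p = 1
--         for y in xr:
--             hor.append(p)
--             p *= (x - y)
--         mat.append(hor)
--     return mat
-- ===== Notes on version B (the rewrite author's own statement) =====
-- stated objective: faster
-- what changed: Each row keeps a running product updated once per column instead of recomputing the full Newton-basis product from scratch for every (i,j) entry.
import Mathlib
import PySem

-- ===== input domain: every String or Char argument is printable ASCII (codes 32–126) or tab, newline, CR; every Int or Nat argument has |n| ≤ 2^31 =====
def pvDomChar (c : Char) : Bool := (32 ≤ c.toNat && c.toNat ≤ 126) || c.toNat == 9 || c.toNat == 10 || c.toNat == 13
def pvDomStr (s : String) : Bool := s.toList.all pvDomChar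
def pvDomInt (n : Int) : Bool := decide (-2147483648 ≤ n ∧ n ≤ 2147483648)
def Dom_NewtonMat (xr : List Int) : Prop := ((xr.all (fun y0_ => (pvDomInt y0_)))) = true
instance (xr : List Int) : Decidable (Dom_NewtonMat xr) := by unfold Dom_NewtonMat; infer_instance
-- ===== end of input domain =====

-- B replaces A's per-entry recomputation of each Newton-basis product with one running product per row (a genuinely different, asymptotically faster traversal).

-- ===== PORT A =====
def NewtonPoly (xr : List Int) (j : Int) (x : Int) : Int :=
  (PySem.List.pyRange 0 j 1).foldl (fun ans i => ans * (x - PySem.List.pyGetD xr i 0)) 1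

def NewtonMat (xr : List Int) : List (List Int) :=
  (PySem.List.pyRange 0 (xr.length : Int) 1).foldl (fun mat i =>
    mat ++ [(PySem.List.pyRange 0 (xr.length : Int) 1).foldl (fun hor j =>
      hor ++ [NewtonPoly xr j (PySem.List.pyGetD xr i 0)]) []]) []

-- ===== PORT B =====
def NewtonMat_alt (xr : List Int) : List (List Int) :=
  xr.foldl (fun mat x =>
    mat ++ [(xr.foldl (fun (st : List Int × Int) y => (st.1 ++ [st.2], st.2 * (x - y))) ([], 1)).1]) []

-- ===== PRECONDITION & SPEC =====
def Spec_NewtonMat (xr : List Int) (out : List (List Int)) : Prop := out = NewtonMat_alt xr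
instance (xr : List Int) (out : List (List Int)) : Decidable (Spec_NewtonMat xr out) := by unfold Spec_NewtonMat; infer_instance

-- ===== CLAIM (what is proved, stated in full; the proofs are below) =====
def Claim_equal_NewtonMat : Prop := ∀ (xr : List Int), Dom_NewtonMat xr → Spec_NewtonMat xr (NewtonMat xr)

-- ===== LEMMAS AND PROOFS =====

-- the prefix product both rows compute at column j (step function of both loops)
def pvProd (x : Int) (l : List Int) : Int := l.foldl (fun a y => a * (x - y)) 1

-- A's entry: NewtonPoly at column j is the prefix product over xr.take j
lemma newtonPoly_eq (xr : List Int) (x : Int) (j : Nat) (hj : j ≤ xr.length) :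
    NewtonPoly xr (j : Int) x = pvProd x (xr.take j) := by
  induction j with
  | zero => simp [NewtonPoly, PySem.List.pyRange_one_eq_nil, pvProd]
  | succ k ih =>
    have hk : k ≤ xr.length := Nat.le_of_succ_le hj
    have hcast : ((k + 1 : Nat) : Int) = (k : Int) + 1 := by push_cast; ring
    unfold NewtonPoly
    rw [hcast, PySem.List.pyRange_one_succ_right (by positivity), List.foldl_append]
    have : (PySem.List.pyRange 0 (k : Int) 1).foldl
        (fun ans i => ans * (x - PySem.List.pyGetD xr i 0)) 1 = pvProd x (xr.take k) := ih hk
    simp only [List.foldl_cons, List.foldl_nil, this]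
    have hget : PySem.List.pyGetD xr (k : Int) 0 = xr.getD k 0 := PySem.List.pyGetD_natCast xr k 0
    have hlt : k < xr.length := hj
    have hz : xr[k]?.toList = [xr[k]] := by simp [List.getElem?_eq_getElem hlt]
    rw [hget, List.take_add_one, hz, List.getD_eq_getElem _ _ hlt]
    simp only [pvProd, List.foldl_append, List.foldl_cons, List.foldl_nil]

-- A's row at query point x
lemma rowA_eq (xr : List Int) (x : Int) :
    (PySem.List.pyRange 0 (xr.length : Int) 1).foldl (fun hor j => hor ++ [NewtonPoly xr j x]) []
      = (List.range xr.length).map (fun j => pvProd x (xr.take j)) := by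
  rw [PySem.List.foldl_append_singleton_eq_map, PySem.List.pyRange_one, List.map_map,
    List.nil_append]
  have hlen : ((xr.length : Int) - 0).toNat = xr.length := by omega
  rw [hlen]
  apply List.map_congr_left
  intro j hj
  have hj' : j ≤ xr.length := le_of_lt (List.mem_range.mp hj)
  simp only [Function.comp_apply, zero_add]
  exact newtonPoly_eq xr x j hj' 

-- B's row: the running-product scan produces the same prefix products
lemma rowB_eq (x : Int) (l : List Int) (acc : List Int) (p : Int) :
    (l.foldl (fun (st : List Int × Int) y => (st.1 ++ [st.2], st.2 * (x - y))) (acc, p)).1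
      = acc ++ (List.range l.length).map (fun j => (l.take j).foldl (fun a y => a * (x - y)) p) := by
  induction l generalizing acc p with
  | nil => simp
  | cons y t ih =>
    rw [List.foldl_cons, ih, List.append_assoc]
    simp only [List.length_cons, List.range_succ_eq_map, List.map_cons, List.map_map,
      List.take_zero, List.foldl_nil, List.singleton_append]
    congr 2

lemma rowB_eq' (x : Int) (xr : List Int) :
    (xr.foldl (fun (st : List Int × Int) y => (st.1 ++ [st.2], st.2 * (x - y))) ([], 1)).1
      = (List.range xr.length).map (fun j => pvProd x (xr.take j)) := by
  rw [rowB_eq, List.nil_append]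
  rfl

-- ===== VERDICT (by name: the statement is the Claim_ definition above) =====
theorem NewtonMat_spec : Claim_equal_NewtonMat := by
  intro xr _
  show NewtonMat xr = NewtonMat_alt xr
  unfold NewtonMat NewtonMat_alt
  rw [PySem.List.foldl_append_singleton_eq_map, PySem.List.foldl_append_singleton_eq_map,
    List.nil_append, List.nil_append]
  apply List.ext_getElem
  · simp only [List.length_map, PySem.List.length_pyRange_one]
    omega
  · intro i hi hi'
    have hi2 : i < xr.length := by simpa using hi'
    rw [List.getElem_map, List.getElem_map,
      PySem.List.getElem_pyRange_one _ _ _ (by simpa using hi)]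
    rw [rowA_eq, rowB_eq']
    congr 2
    rw [show ((0 : Int) + (i : Nat) : Int) = ((i : Nat) : Int) by ring, PySem.List.pyGetD_natCast,
      List.getD_eq_getElem _ _ hi2]
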